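-- pv_equiv track=rewrite | github.com/ConnectedReasoning/FormaComposition | forma/intervals/music/harmony.py | parse_roman
-- ===== SOURCE A (Python) =====
-- from typing import Optional
--
-- ROMAN_TO_DEGREE = {
--     "I": 0, "II": 1, "III": 2, "IV": 3, "V": 4, "VI": 5, "VII": 6,
--     "i": 0, "ii": 1, "iii": 2, "iv": 3, "v": 4, "vi": 5, "vii": 6,
-- }
--
-- QUALITY_SYMBOLS = {
--     "maj":  "major",
--     "min":  "minor",
--     "dim":  "diminished",
--     "aug":  "augmented",
--     "maj7": "major7",
--     "m7":   "minor7",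
--     "7":    "dominant7",
--     "dim7": "diminished7",
--     "m9":   "minor9",
--     "maj9": "major9",
--     "9":    "dominant9",
--     "m11":  "minor11",
--     "11":   "dominant11",
-- }
--
-- def parse_roman(roman: str) -> tuple[int, Optional[str]]:
--     """
--     Parse a Roman numeral string into (degree_index, quality_override_or_None).
--     Supports chromatic alterations with 'b' (flat) and '#' (sharp) prefixes.
--
--     Examples:
--         "i"      → (0, None)
--         "IV"     → (3, None)
--         "iim7"   → (1, "minor7")
--         "Vmaj9"  → (4, "major9")
--         "viidim" → (6, "diminished")
--         "bVI"    → (5, None)  [VI lowered by semitone]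
--         "#iv"    → (3, None)  [iv raised by semitone]
--         "bVImaj7" → (5, "major7")  [alteration + quality]
--     """
--     # Strip leading/trailing whitespace
--     roman = roman.strip()
--
--     # Check for chromatic alteration prefix
--     alteration = 0  # -1 for flat, +1 for sharp
--     if roman.startswith('b'):
--         alteration = -1
--         roman = roman[1:]
--     elif roman.startswith('#'):
--         alteration = 1
--         roman = roman[1:]
--
--     # Extract the base Roman numeral (uppercase comparison)
--     upper = roman.upper()
--     base = None
--     for r in sorted(ROMAN_TO_DEGREE.keys(), key=len, reverse=True):
--         if upper.startswith(r.upper()):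
--             base = r.upper()
--             break
--     if base is None:
--         raise ValueError(f"Cannot parse Roman numeral: '{roman}'")
--
--     degree = ROMAN_TO_DEGREE[base.upper()]
--
--     # Apply chromatic alteration
--     # In a 7-degree system, alterations wrap: bI → VII, #VII → I, etc.
--     degree = (degree + alteration) % 7
--
--     remainder = roman[len(base):]  # anything after the numeral
--
--     # Check for explicit quality symbol
--     quality_override = None
--     for symbol in sorted(QUALITY_SYMBOLS.keys(), key=len, reverse=True):
--         if remainder.lower().startswith(symbol.lower()):
--             quality_override = QUALITY_SYMBOLS[symbol.lower()]
--             break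
--
--     return degree, quality_override
-- ===== SOURCE B (Python) =====
-- from typing import Optional
--
-- _ALTER = {"b": -1, "#": 1}
-- _NUM3 = {"III": 2, "VII": 6}
-- _NUM2 = {"II": 1, "IV": 3, "VI": 5}
-- _NUM1 = {"I": 0, "V": 4}
-- _Q4 = {"maj7": "major7", "dim7": "diminished7", "maj9": "major9"}
-- _Q3 = {"maj": "major", "min": "minor", "dim": "diminished",
--        "aug": "augmented", "m11": "minor11"}
-- _Q2 = {"m7": "minor7", "m9": "minor9", "11": "dominant11"}
-- _Q1 = {"7": "dominant7", "9": "dominant9"}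
--
--
-- def parse_roman(roman: str) -> tuple[int, Optional[str]]:
--     s = roman.strip()
--     alt = _ALTER.get(s[:1], 0)
--     if alt:
--         s = s[1:]
--     u = s.upper()
--     k = 0
--     deg = _NUM3.get(u[:3])
--     if deg is not None:
--         k = 3
--     else:
--         deg = _NUM2.get(u[:2])
--         if deg is not None:
--             k = 2
--         else:
--             deg = _NUM1.get(u[:1])
--             if deg is not None:
--                 k = 1
--     if deg is None:
--         raise ValueError(f"Cannot parse Roman numeral: '{s}'")
--     rem = s[k:].lower()
--     qual = _Q4.get(rem[:4]) or _Q3.get(rem[:3]) or _Q2.get(rem[:2]) or _Q1.get(rem[:1])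
--     return (deg + alt) % 7, qual
-- ===== Notes on version B (the rewrite author's own statement) =====
-- stated objective: alternative
-- what changed: B replaces A's per-call sorting of the key lists and longest-first linear prefix scans with length-bucketed dictionary lookups on fixed-size prefixes (constant tables, one lookup per prefix length).
-- outside the precondition, e.g. on parse_roman('b'): A raises ValueError, B raises ValueError; on parse_roman('#'): A raises ValueError, B raises ValueError
import Mathlib
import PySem

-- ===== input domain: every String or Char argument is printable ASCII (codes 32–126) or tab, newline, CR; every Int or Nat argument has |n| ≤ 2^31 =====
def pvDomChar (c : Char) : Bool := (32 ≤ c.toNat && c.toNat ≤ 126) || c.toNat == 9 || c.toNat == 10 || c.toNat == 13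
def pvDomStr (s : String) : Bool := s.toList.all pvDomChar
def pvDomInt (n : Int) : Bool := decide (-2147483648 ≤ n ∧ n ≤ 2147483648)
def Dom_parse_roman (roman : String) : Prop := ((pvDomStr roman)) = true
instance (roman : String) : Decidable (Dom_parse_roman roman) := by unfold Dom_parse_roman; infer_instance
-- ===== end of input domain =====

-- B replaces A's longest-first linear scans over the sorted key lists with length-bucketed
-- dictionary lookups on fixed-size prefixes (objective: alternative; same observable behaviour).

-- ===== PORT A =====

-- ROMAN_TO_DEGREE and its key list (dict insertion order)
def pvRomanKeys : List (List Char) :=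
  [['I'], ['I','I'], ['I','I','I'], ['I','V'], ['V'], ['V','I'], ['V','I','I'], ['i'], ['i','i'], ['i','i','i'], ['i','v'], ['v'], ['v','i'], ['v','i','i']]

def pvRomanToDegree : PySem.Dict (List Char) Int :=
  PySem.Dict.ofList [(['I'], 0), (['I','I'], 1), (['I','I','I'], 2), (['I','V'], 3), (['V'], 4), (['V','I'], 5), (['V','I','I'], 6), (['i'], 0), (['i','i'], 1), (['i','i','i'], 2), (['i','v'], 3), (['v'], 4), (['v','i'], 5), (['v','i','i'], 6)]

-- QUALITY_SYMBOLS and its key list (dict insertion order)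
def pvQualityKeysA : List (List Char) :=
  [['m','a','j'], ['m','i','n'], ['d','i','m'], ['a','u','g'], ['m','a','j','7'], ['m','7'], ['7'], ['d','i','m','7'], ['m','9'], ['m','a','j','9'], ['9'], ['m','1','1'], ['1','1']]

def pvQualitySymbols : PySem.Dict (List Char) String :=
  PySem.Dict.ofList [(['m','a','j'], "major"), (['m','i','n'], "minor"), (['d','i','m'], "diminished"), (['a','u','g'], "augmented"), (['m','a','j','7'], "major7"), (['m','7'], "minor7"), (['7'], "dominant7"), (['d','i','m','7'], "diminished7"), (['m','9'], "minor9"), (['m','a','j','9'], "major9"), (['9'], "dominant9"), (['m','1','1'], "minor11"), (['1','1'], "dominant11")]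

/-- A's first loop: first key (in sorted order) whose uppercase form is a prefix of `upper`. -/
def pvFindBase : List (List Char) → List Char → Option (List Char)
  | [], _ => none
  | r :: rest, upper =>
      if PySem.Chars.startswith upper (PySem.Chars.upper r) then some (PySem.Chars.upper r)
      else pvFindBase rest upper

/-- A's second loop: first quality symbol (in sorted order) that prefixes the lowercased
remainder, looked up in QUALITY_SYMBOLS (the lookup always succeeds, so the Option is the
`quality_override`). -/
def pvFindQuality : List (List Char) → List Char → Option String
  | [], _ => none
  | sym :: rest, remainder =>
      if PySem.Chars.startswith (PySem.Chars.lower remainder) (PySem.Chars.lower sym) then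
        pvQualitySymbols.get? (PySem.Chars.lower sym)
      else pvFindQuality rest remainder

def parse_roman (roman : String) : Int × Option String :=
  let s0 := PySem.Chars.strip roman.toList
  -- alteration prefix: 'b' → -1 and strip it, '#' → +1 and strip it
  let p : Int × List Char :=
    if PySem.Chars.startswith s0 ['b'] then (-1, PySem.List.slice s0 (some 1) none)
    else if PySem.Chars.startswith s0 ['#'] then (1, PySem.List.slice s0 (some 1) none)
    else (0, s0)
  let alteration := p.1
  let s := p.2
  let upper := PySem.Chars.upper s
  match pvFindBase (PySem.List.sorted pvRomanKeys (fun r => r.length) true) upper with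
  | none => (0, none)   -- Python raises ValueError here; excluded by Pre_parse_roman
  | some base =>
      let degree := (pvRomanToDegree.get? base).getD 0   -- key always present in A's dict
      let degree := PySem.Int.mod (degree + alteration) 7
      let remainder := PySem.List.slice s (some (base.length : Int)) none
      (degree, pvFindQuality (PySem.List.sorted pvQualityKeysA (fun r => r.length) true) remainder)

-- ===== PORT B =====

def pvAlter : PySem.Dict (List Char) Int := PySem.Dict.ofList [(['b'], -1), (['#'], 1)]
def pvNum3 : PySem.Dict (List Char) Int := PySem.Dict.ofList [(['I','I','I'], 2), (['V','I','I'], 6)]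
def pvNum2 : PySem.Dict (List Char) Int := PySem.Dict.ofList [(['I','I'], 1), (['I','V'], 3), (['V','I'], 5)]
def pvNum1 : PySem.Dict (List Char) Int := PySem.Dict.ofList [(['I'], 0), (['V'], 4)]
def pvQ4 : PySem.Dict (List Char) String := PySem.Dict.ofList [(['m','a','j','7'], "major7"), (['d','i','m','7'], "diminished7"), (['m','a','j','9'], "major9")]
def pvQ3 : PySem.Dict (List Char) String := PySem.Dict.ofList [(['m','a','j'], "major"), (['m','i','n'], "minor"), (['d','i','m'], "diminished"), (['a','u','g'], "augmented"), (['m','1','1'], "minor11")]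
def pvQ2 : PySem.Dict (List Char) String := PySem.Dict.ofList [(['m','7'], "minor7"), (['m','9'], "minor9"), (['1','1'], "dominant11")]
def pvQ1 : PySem.Dict (List Char) String := PySem.Dict.ofList [(['7'], "dominant7"), (['9'], "dominant9")]

/-- B's numeral parse: length-bucketed dictionary lookups on prefixes of 3, 2, 1 chars. -/
def pvMatchNum (u : List Char) : Option (Int × Nat) :=
  match pvNum3.get? (u.take 3) with
  | some d => some (d, 3)
  | none =>
    match pvNum2.get? (u.take 2) with
    | some d => some (d, 2)
    | none =>
      match pvNum1.get? (u.take 1) with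
      | some d => some (d, 1)
      | none => none

def parse_roman_alt (roman : String) : Int × Option String :=
  let s0 := PySem.Chars.strip roman.toList
  let alt : Int := (pvAlter.get? (s0.take 1)).getD 0
  let s := if alt ≠ 0 then s0.drop 1 else s0
  let u := PySem.Chars.upper s
  match pvMatchNum u with
  | none => (0, none)   -- Python raises ValueError here; excluded by Pre_parse_roman
  | some dk =>
      let rem := PySem.Chars.lower (s.drop dk.2)
      let qual := (pvQ4.get? (rem.take 4)).or
        ((pvQ3.get? (rem.take 3)).or ((pvQ2.get? (rem.take 2)).or (pvQ1.get? (rem.take 1))))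
      (PySem.Int.mod (dk.1 + alt) 7, qual)

-- ===== PRECONDITION & SPEC =====

/-- The stripped input after removing an optional 'b'/'#' alteration prefix. -/
def pvAfterAlt (s : List Char) : List Char :=
  if s.take 1 = ['b'] ∨ s.take 1 = ['#'] then s.drop 1 else s

-- Pre_ excludes exactly the inputs where A raises ValueError: after stripping whitespace and an
-- optional 'b'/'#' prefix, the string must start with a Roman-numeral letter (I, i, V or v).
def Pre_parse_roman (roman : String) : Prop :=
  (pvAfterAlt (PySem.Chars.strip roman.toList)).take 1 = ['I'] ∨
  (pvAfterAlt (PySem.Chars.strip roman.toList)).take 1 = ['i'] ∨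
  (pvAfterAlt (PySem.Chars.strip roman.toList)).take 1 = ['V'] ∨
  (pvAfterAlt (PySem.Chars.strip roman.toList)).take 1 = ['v']
instance (roman : String) : Decidable (Pre_parse_roman roman) := by unfold Pre_parse_roman; infer_instance

def pvWitness_parse_roman : String := "iim7"

def Spec_parse_roman (roman : String) (out : Int × Option String) : Prop := out = parse_roman_alt roman
instance (roman : String) (out : Int × Option String) : Decidable (Spec_parse_roman roman out) := by unfold Spec_parse_roman; infer_instance

-- ===== CLAIM (what is proved, stated in full; the proofs are below) =====
def Claim_equal_parse_roman : Prop := ∀ (roman : String), Dom_parse_roman roman → Pre_parse_roman roman → Spec_parse_roman roman (parse_roman roman)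

-- ===== LEMMAS AND PROOFS =====

/-- s.startswith(p) tests p against the length-|p| prefix. -/
lemma pv_sw (l p : List Char) : PySem.Chars.startswith l p = (p == l.take p.length) := by
  simp only [PySem.Chars.startswith]
  rw [Bool.eq_iff_iff]
  simp [List.isPrefixOf_iff_prefix, List.prefix_iff_eq_take]

/-- sorted(ROMAN_TO_DEGREE.keys(), key=len, reverse=True), evaluated. -/
lemma sortedRoman :
    PySem.List.sorted pvRomanKeys (fun r => r.length) true = [['I','I','I'], ['V','I','I'], ['i','i','i'], ['v','i','i'], ['I','I'], ['I','V'], ['V','I'], ['i','i'], ['i','v'], ['v','i'], ['I'], ['V'], ['i'], ['v']] := by decide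

/-- sorted(QUALITY_SYMBOLS.keys(), key=len, reverse=True), evaluated. -/
lemma sortedQual :
    PySem.List.sorted pvQualityKeysA (fun r => r.length) true = [['m','a','j','7'], ['d','i','m','7'], ['m','a','j','9'], ['m','a','j'], ['m','i','n'], ['d','i','m'], ['a','u','g'], ['m','1','1'], ['m','7'], ['m','9'], ['1','1'], ['7'], ['9']] := by decide

lemma base_eq (u : List Char) :
    (pvFindBase [['I','I','I'], ['V','I','I'], ['i','i','i'], ['v','i','i'], ['I','I'], ['I','V'], ['V','I'], ['i','i'], ['i','v'], ['v','i'], ['I'], ['V'], ['i'], ['v']] u).map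
      (fun b => ((pvRomanToDegree.get? b).getD 0, b.length)) = pvMatchNum u := by
  have hn3 : pvNum3 = PySem.Dict.mk [(['I','I','I'], 2), (['V','I','I'], 6)] := by decide
  have hn2 : pvNum2 = PySem.Dict.mk [(['I','I'], 1), (['I','V'], 3), (['V','I'], 5)] := by decide
  have hn1 : pvNum1 = PySem.Dict.mk [(['I'], 0), (['V'], 4)] := by decide
  have eu0 : PySem.Chars.upper ['I','I','I'] = ['I','I','I'] := by decide
  have eu1 : PySem.Chars.upper ['V','I','I'] = ['V','I','I'] := by decide
  have eu2 : PySem.Chars.upper ['i','i','i'] = ['I','I','I'] := by decide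
  have eu3 : PySem.Chars.upper ['v','i','i'] = ['V','I','I'] := by decide
  have eu4 : PySem.Chars.upper ['I','I'] = ['I','I'] := by decide
  have eu5 : PySem.Chars.upper ['I','V'] = ['I','V'] := by decide
  have eu6 : PySem.Chars.upper ['V','I'] = ['V','I'] := by decide
  have eu7 : PySem.Chars.upper ['i','i'] = ['I','I'] := by decide
  have eu8 : PySem.Chars.upper ['i','v'] = ['I','V'] := by decide
  have eu9 : PySem.Chars.upper ['v','i'] = ['V','I'] := by decide
  have eu10 : PySem.Chars.upper ['I'] = ['I'] := by decide
  have eu11 : PySem.Chars.upper ['V'] = ['V'] := by decide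
  have eu12 : PySem.Chars.upper ['i'] = ['I'] := by decide
  have eu13 : PySem.Chars.upper ['v'] = ['V'] := by decide
  cases u with
  | nil => rfl
  | cons c1 u1 =>
    by_cases h1I : c1 = 'I'
    · subst h1I
      cases u1 with
      | nil => rfl
      | cons c2 u2 =>
        by_cases h2I : c2 = 'I'
        · subst h2I
          cases u2 with
          | nil => rfl
          | cons c3 u3 =>
            by_cases h3I : c3 = 'I'
            · subst h3I; rfl
            · simp [pvFindBase, pvMatchNum, pv_sw, hn3, hn2, hn1, PySem.Dict.get?_mk_cons, PySem.Dict.get?, List.take, List.find?, List.cons_beq_cons, eu0, eu1, eu2, eu3, eu4, eu5, eu6, eu7, eu8, eu9, eu10, eu11, eu12, eu13, h3I, Ne.symm h3I, beq_eq_false_iff_ne.mpr h3I, beq_eq_false_iff_ne.mpr (Ne.symm h3I)] <;> decide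
        · by_cases h2V : c2 = 'V'
          · subst h2V; rfl
          · simp [pvFindBase, pvMatchNum, pv_sw, hn3, hn2, hn1, PySem.Dict.get?_mk_cons, PySem.Dict.get?, List.take, List.find?, List.cons_beq_cons, eu0, eu1, eu2, eu3, eu4, eu5, eu6, eu7, eu8, eu9, eu10, eu11, eu12, eu13, h2I, Ne.symm h2I, beq_eq_false_iff_ne.mpr h2I, beq_eq_false_iff_ne.mpr (Ne.symm h2I), h2V, Ne.symm h2V, beq_eq_false_iff_ne.mpr h2V, beq_eq_false_iff_ne.mpr (Ne.symm h2V)] <;> decide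
    · by_cases h1V : c1 = 'V'
      · subst h1V
        cases u1 with
        | nil => rfl
        | cons c2 u2 =>
          by_cases h2I : c2 = 'I'
          · subst h2I
            cases u2 with
            | nil => rfl
            | cons c3 u3 =>
              by_cases h3I : c3 = 'I'
              · subst h3I; rfl
              · simp [pvFindBase, pvMatchNum, pv_sw, hn3, hn2, hn1, PySem.Dict.get?_mk_cons, PySem.Dict.get?, List.take, List.find?, List.cons_beq_cons, eu0, eu1, eu2, eu3, eu4, eu5, eu6, eu7, eu8, eu9, eu10, eu11, eu12, eu13, h3I, Ne.symm h3I, beq_eq_false_iff_ne.mpr h3I, beq_eq_false_iff_ne.mpr (Ne.symm h3I)] <;> decide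
          · simp [pvFindBase, pvMatchNum, pv_sw, hn3, hn2, hn1, PySem.Dict.get?_mk_cons, PySem.Dict.get?, List.take, List.find?, List.cons_beq_cons, eu0, eu1, eu2, eu3, eu4, eu5, eu6, eu7, eu8, eu9, eu10, eu11, eu12, eu13, h2I, Ne.symm h2I, beq_eq_false_iff_ne.mpr h2I, beq_eq_false_iff_ne.mpr (Ne.symm h2I)] <;> decide
      · simp [pvFindBase, pvMatchNum, pv_sw, hn3, hn2, hn1, PySem.Dict.get?_mk_cons, PySem.Dict.get?, List.take, List.find?, List.cons_beq_cons, eu0, eu1, eu2, eu3, eu4, eu5, eu6, eu7, eu8, eu9, eu10, eu11, eu12, eu13, h1I, Ne.symm h1I, beq_eq_false_iff_ne.mpr h1I, beq_eq_false_iff_ne.mpr (Ne.symm h1I), h1V, Ne.symm h1V, beq_eq_false_iff_ne.mpr h1V, beq_eq_false_iff_ne.mpr (Ne.symm h1V)] <;> decide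

lemma qual_eq (r : List Char) :
    pvFindQuality [['m','a','j','7'], ['d','i','m','7'], ['m','a','j','9'], ['m','a','j'], ['m','i','n'], ['d','i','m'], ['a','u','g'], ['m','1','1'], ['m','7'], ['m','9'], ['1','1'], ['7'], ['9']] r =
      (pvQ4.get? ((PySem.Chars.lower r).take 4)).or
        ((pvQ3.get? ((PySem.Chars.lower r).take 3)).or
          ((pvQ2.get? ((PySem.Chars.lower r).take 2)).or (pvQ1.get? ((PySem.Chars.lower r).take 1)))) := by
  have hq : pvQualitySymbols = PySem.Dict.mk [(['m','a','j'], "major"), (['m','i','n'], "minor"), (['d','i','m'], "diminished"), (['a','u','g'], "augmented"), (['m','a','j','7'], "major7"), (['m','7'], "minor7"), (['7'], "dominant7"), (['d','i','m','7'], "diminished7"), (['m','9'], "minor9"), (['m','a','j','9'], "major9"), (['9'], "dominant9"), (['m','1','1'], "minor11"), (['1','1'], "dominant11")] := by decide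
  have hq4 : pvQ4 = PySem.Dict.mk [(['m','a','j','7'], "major7"), (['d','i','m','7'], "diminished7"), (['m','a','j','9'], "major9")] := by decide
  have hq3 : pvQ3 = PySem.Dict.mk [(['m','a','j'], "major"), (['m','i','n'], "minor"), (['d','i','m'], "diminished"), (['a','u','g'], "augmented"), (['m','1','1'], "minor11")] := by decide
  have hq2 : pvQ2 = PySem.Dict.mk [(['m','7'], "minor7"), (['m','9'], "minor9"), (['1','1'], "dominant11")] := by decide
  have hq1 : pvQ1 = PySem.Dict.mk [(['7'], "dominant7"), (['9'], "dominant9")] := by decide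
  have el0 : PySem.Chars.lower ['m','a','j','7'] = ['m','a','j','7'] := by decide
  have el1 : PySem.Chars.lower ['d','i','m','7'] = ['d','i','m','7'] := by decide
  have el2 : PySem.Chars.lower ['m','a','j','9'] = ['m','a','j','9'] := by decide
  have el3 : PySem.Chars.lower ['m','a','j'] = ['m','a','j'] := by decide
  have el4 : PySem.Chars.lower ['m','i','n'] = ['m','i','n'] := by decide
  have el5 : PySem.Chars.lower ['d','i','m'] = ['d','i','m'] := by decide
  have el6 : PySem.Chars.lower ['a','u','g'] = ['a','u','g'] := by decide
  have el7 : PySem.Chars.lower ['m','1','1'] = ['m','1','1'] := by decide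
  have el8 : PySem.Chars.lower ['m','7'] = ['m','7'] := by decide
  have el9 : PySem.Chars.lower ['m','9'] = ['m','9'] := by decide
  have el10 : PySem.Chars.lower ['1','1'] = ['1','1'] := by decide
  have el11 : PySem.Chars.lower ['7'] = ['7'] := by decide
  have el12 : PySem.Chars.lower ['9'] = ['9'] := by decide
  simp only [pvFindQuality, el0, el1, el2, el3, el4, el5, el6, el7, el8, el9, el10, el11, el12]
  generalize PySem.Chars.lower r = l
  cases l with
  | nil => decide
  | cons c1 l1 =>
    by_cases h1m : c1 = 'm'
    · subst h1m
      cases l1 with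
      | nil => decide
      | cons c2 l2 =>
        by_cases h2a : c2 = 'a'
        · subst h2a
          cases l2 with
          | nil => decide
          | cons c3 l3 =>
            by_cases h3j : c3 = 'j'
            · subst h3j
              cases l3 with
              | nil => decide
              | cons c4 l4 =>
                by_cases h47 : c4 = '7'
                · subst h47; rfl
                · by_cases h49 : c4 = '9'
                  · subst h49; rfl
                  · simp [pvFindQuality, hq, hq4, hq3, hq2, hq1, pv_sw, PySem.Dict.get?_mk_cons, PySem.Dict.get?, List.take, List.find?, List.cons_beq_cons, Option.some_or, Option.none_or, el0, el1, el2, el3, el4, el5, el6, el7, el8, el9, el10, el11, el12, h47, Ne.symm h47, beq_eq_false_iff_ne.mpr h47, beq_eq_false_iff_ne.mpr (Ne.symm h47), h49, Ne.symm h49, beq_eq_false_iff_ne.mpr h49, beq_eq_false_iff_ne.mpr (Ne.symm h49)] <;> decide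
            · simp [pvFindQuality, hq, hq4, hq3, hq2, hq1, pv_sw, PySem.Dict.get?_mk_cons, PySem.Dict.get?, List.take, List.find?, List.cons_beq_cons, Option.some_or, Option.none_or, el0, el1, el2, el3, el4, el5, el6, el7, el8, el9, el10, el11, el12, h3j, Ne.symm h3j, beq_eq_false_iff_ne.mpr h3j, beq_eq_false_iff_ne.mpr (Ne.symm h3j)] <;> decide
        · by_cases h2i : c2 = 'i'
          · subst h2i
            cases l2 with
            | nil => decide
            | cons c3 l3 =>
              by_cases h3n : c3 = 'n'
              · subst h3n; rfl
              · simp [pvFindQuality, hq, hq4, hq3, hq2, hq1, pv_sw, PySem.Dict.get?_mk_cons, PySem.Dict.get?, List.take, List.find?, List.cons_beq_cons, Option.some_or, Option.none_or, el0, el1, el2, el3, el4, el5, el6, el7, el8, el9, el10, el11, el12, h3n, Ne.symm h3n, beq_eq_false_iff_ne.mpr h3n, beq_eq_false_iff_ne.mpr (Ne.symm h3n)] <;> decide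
          · by_cases h21 : c2 = '1'
            · subst h21
              cases l2 with
              | nil => decide
              | cons c3 l3 =>
                by_cases h31 : c3 = '1'
                · subst h31; rfl
                · simp [pvFindQuality, hq, hq4, hq3, hq2, hq1, pv_sw, PySem.Dict.get?_mk_cons, PySem.Dict.get?, List.take, List.find?, List.cons_beq_cons, Option.some_or, Option.none_or, el0, el1, el2, el3, el4, el5, el6, el7, el8, el9, el10, el11, el12, h31, Ne.symm h31, beq_eq_false_iff_ne.mpr h31, beq_eq_false_iff_ne.mpr (Ne.symm h31)] <;> decide
            · by_cases h27 : c2 = '7'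
              · subst h27; rfl
              · by_cases h29 : c2 = '9'
                · subst h29; rfl
                · simp [pvFindQuality, hq, hq4, hq3, hq2, hq1, pv_sw, PySem.Dict.get?_mk_cons, PySem.Dict.get?, List.take, List.find?, List.cons_beq_cons, Option.some_or, Option.none_or, el0, el1, el2, el3, el4, el5, el6, el7, el8, el9, el10, el11, el12, h2a, Ne.symm h2a, beq_eq_false_iff_ne.mpr h2a, beq_eq_false_iff_ne.mpr (Ne.symm h2a), h2i, Ne.symm h2i, beq_eq_false_iff_ne.mpr h2i, beq_eq_false_iff_ne.mpr (Ne.symm h2i), h21, Ne.symm h21, beq_eq_false_iff_ne.mpr h21, beq_eq_false_iff_ne.mpr (Ne.symm h21), h27, Ne.symm h27, beq_eq_false_iff_ne.mpr h27, beq_eq_false_iff_ne.mpr (Ne.symm h27), h29, Ne.symm h29, beq_eq_false_iff_ne.mpr h29, beq_eq_false_iff_ne.mpr (Ne.symm h29)] <;> decide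
    · by_cases h1d : c1 = 'd'
      · subst h1d
        cases l1 with
        | nil => decide
        | cons c2 l2 =>
          by_cases h2i : c2 = 'i'
          · subst h2i
            cases l2 with
            | nil => decide
            | cons c3 l3 =>
              by_cases h3m : c3 = 'm'
              · subst h3m
                cases l3 with
                | nil => decide
                | cons c4 l4 =>
                  by_cases h47 : c4 = '7'
                  · subst h47; rfl
                  · simp [pvFindQuality, hq, hq4, hq3, hq2, hq1, pv_sw, PySem.Dict.get?_mk_cons, PySem.Dict.get?, List.take, List.find?, List.cons_beq_cons, Option.some_or, Option.none_or, el0, el1, el2, el3, el4, el5, el6, el7, el8, el9, el10, el11, el12, h47, Ne.symm h47, beq_eq_false_iff_ne.mpr h47, beq_eq_false_iff_ne.mpr (Ne.symm h47)] <;> decide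
              · simp [pvFindQuality, hq, hq4, hq3, hq2, hq1, pv_sw, PySem.Dict.get?_mk_cons, PySem.Dict.get?, List.take, List.find?, List.cons_beq_cons, Option.some_or, Option.none_or, el0, el1, el2, el3, el4, el5, el6, el7, el8, el9, el10, el11, el12, h3m, Ne.symm h3m, beq_eq_false_iff_ne.mpr h3m, beq_eq_false_iff_ne.mpr (Ne.symm h3m)] <;> decide
          · simp [pvFindQuality, hq, hq4, hq3, hq2, hq1, pv_sw, PySem.Dict.get?_mk_cons, PySem.Dict.get?, List.take, List.find?, List.cons_beq_cons, Option.some_or, Option.none_or, el0, el1, el2, el3, el4, el5, el6, el7, el8, el9, el10, el11, el12, h2i, Ne.symm h2i, beq_eq_false_iff_ne.mpr h2i, beq_eq_false_iff_ne.mpr (Ne.symm h2i)] <;> decide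
      · by_cases h1a : c1 = 'a'
        · subst h1a
          cases l1 with
          | nil => decide
          | cons c2 l2 =>
            by_cases h2u : c2 = 'u'
            · subst h2u
              cases l2 with
              | nil => decide
              | cons c3 l3 =>
                by_cases h3g : c3 = 'g'
                · subst h3g; rfl
                · simp [pvFindQuality, hq, hq4, hq3, hq2, hq1, pv_sw, PySem.Dict.get?_mk_cons, PySem.Dict.get?, List.take, List.find?, List.cons_beq_cons, Option.some_or, Option.none_or, el0, el1, el2, el3, el4, el5, el6, el7, el8, el9, el10, el11, el12, h3g, Ne.symm h3g, beq_eq_false_iff_ne.mpr h3g, beq_eq_false_iff_ne.mpr (Ne.symm h3g)] <;> decide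
            · simp [pvFindQuality, hq, hq4, hq3, hq2, hq1, pv_sw, PySem.Dict.get?_mk_cons, PySem.Dict.get?, List.take, List.find?, List.cons_beq_cons, Option.some_or, Option.none_or, el0, el1, el2, el3, el4, el5, el6, el7, el8, el9, el10, el11, el12, h2u, Ne.symm h2u, beq_eq_false_iff_ne.mpr h2u, beq_eq_false_iff_ne.mpr (Ne.symm h2u)] <;> decide
        · by_cases h11 : c1 = '1'
          · subst h11
            cases l1 with
            | nil => decide
            | cons c2 l2 =>
              by_cases h21 : c2 = '1'
              · subst h21; rfl
              · simp [pvFindQuality, hq, hq4, hq3, hq2, hq1, pv_sw, PySem.Dict.get?_mk_cons, PySem.Dict.get?, List.take, List.find?, List.cons_beq_cons, Option.some_or, Option.none_or, el0, el1, el2, el3, el4, el5, el6, el7, el8, el9, el10, el11, el12, h21, Ne.symm h21, beq_eq_false_iff_ne.mpr h21, beq_eq_false_iff_ne.mpr (Ne.symm h21)] <;> decide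
          · by_cases h17 : c1 = '7'
            · subst h17; rfl
            · by_cases h19 : c1 = '9'
              · subst h19; rfl
              · simp [pvFindQuality, hq, hq4, hq3, hq2, hq1, pv_sw, PySem.Dict.get?_mk_cons, PySem.Dict.get?, List.take, List.find?, List.cons_beq_cons, Option.some_or, Option.none_or, el0, el1, el2, el3, el4, el5, el6, el7, el8, el9, el10, el11, el12, h1m, Ne.symm h1m, beq_eq_false_iff_ne.mpr h1m, beq_eq_false_iff_ne.mpr (Ne.symm h1m), h1d, Ne.symm h1d, beq_eq_false_iff_ne.mpr h1d, beq_eq_false_iff_ne.mpr (Ne.symm h1d), h1a, Ne.symm h1a, beq_eq_false_iff_ne.mpr h1a, beq_eq_false_iff_ne.mpr (Ne.symm h1a), h11, Ne.symm h11, beq_eq_false_iff_ne.mpr h11, beq_eq_false_iff_ne.mpr (Ne.symm h11), h17, Ne.symm h17, beq_eq_false_iff_ne.mpr h17, beq_eq_false_iff_ne.mpr (Ne.symm h17), h19, Ne.symm h19, beq_eq_false_iff_ne.mpr h19, beq_eq_false_iff_ne.mpr (Ne.symm h19)] <;> decide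

lemma matchNum_ne_none (t : List Char)
    (h : t.take 1 = ['I'] ∨ t.take 1 = ['i'] ∨ t.take 1 = ['V'] ∨ t.take 1 = ['v']) :
    pvMatchNum (PySem.Chars.upper t) ≠ none := by
  have hu : (PySem.Chars.upper t).take 1 = ['I'] ∨ (PySem.Chars.upper t).take 1 = ['V'] := by
    simp only [PySem.Chars.upper]
    rw [← List.map_take]
    rcases h with h | h | h | h <;> rw [h] <;> [left; left; right; right] <;> decide
  intro hn
  have h1 : pvNum1.get? ((PySem.Chars.upper t).take 1) ≠ none := by
    rcases hu with hu | hu <;> rw [hu] <;> decide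
  simp only [pvMatchNum] at hn
  split at hn
  · simp at hn
  · split at hn
    · simp at hn
    · split at hn
      · simp at hn
      · exact h1 (by assumption)

lemma core (t : List Char) (alt : Int)
    (h : t.take 1 = ['I'] ∨ t.take 1 = ['i'] ∨ t.take 1 = ['V'] ∨ t.take 1 = ['v']) :
    (match pvFindBase [['I','I','I'], ['V','I','I'], ['i','i','i'], ['v','i','i'], ['I','I'], ['I','V'], ['V','I'], ['i','i'], ['i','v'], ['v','i'], ['I'], ['V'], ['i'], ['v']] (PySem.Chars.upper t) with
     | none => ((0 : Int), (none : Option String))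
     | some base =>
        (PySem.Int.mod ((pvRomanToDegree.get? base).getD 0 + alt) 7,
         pvFindQuality [['m','a','j','7'], ['d','i','m','7'], ['m','a','j','9'], ['m','a','j'], ['m','i','n'], ['d','i','m'], ['a','u','g'], ['m','1','1'], ['m','7'], ['m','9'], ['1','1'], ['7'], ['9']] (PySem.List.slice t (some (base.length : Int)) none)))
    =
    (match pvMatchNum (PySem.Chars.upper t) with
     | none => ((0 : Int), (none : Option String))
     | some dk =>
        (PySem.Int.mod (dk.1 + alt) 7,
         (pvQ4.get? ((PySem.Chars.lower (t.drop dk.2)).take 4)).or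
           ((pvQ3.get? ((PySem.Chars.lower (t.drop dk.2)).take 3)).or
             ((pvQ2.get? ((PySem.Chars.lower (t.drop dk.2)).take 2)).or
               (pvQ1.get? ((PySem.Chars.lower (t.drop dk.2)).take 1)))))) := by
  cases hfb : pvFindBase [['I','I','I'], ['V','I','I'], ['i','i','i'], ['v','i','i'], ['I','I'], ['I','V'], ['V','I'], ['i','i'], ['i','v'], ['v','i'], ['I'], ['V'], ['i'], ['v']] (PySem.Chars.upper t) with
  | none =>
    exfalso
    have hb := base_eq (PySem.Chars.upper t)
    rw [hfb] at hb
    simp only [Option.map_none] at hb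
    exact matchNum_ne_none t h hb.symm
  | some base =>
    have hb := base_eq (PySem.Chars.upper t)
    rw [hfb] at hb
    simp only [Option.map_some] at hb
    rw [← hb]
    have hsl : PySem.List.slice t (some ((base.length : Nat) : Int)) none = t.drop base.length := by
      rw [PySem.List.slice_from _ (by positivity)]
      simp
    simp only [hsl, qual_eq]

-- ===== VERDICT (by name: the statement is the Claim_ definition above) =====
theorem parse_roman_spec : Claim_equal_parse_roman := by
  intro roman _hdom hpre
  unfold Spec_parse_roman parse_roman parse_roman_alt
  unfold Pre_parse_roman pvAfterAlt at hpre
  rw [sortedRoman, sortedQual]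
  have ha : pvAlter = PySem.Dict.mk [(['b'], -1), (['#'], 1)] := by decide
  have hsl1 : ∀ s0 : List Char, PySem.List.slice s0 (some 1) none = s0.drop 1 := by
    intro s0
    rw [PySem.List.slice_from _ (by norm_num)]
    rfl
  generalize hs : PySem.Chars.strip roman.toList = s0 at hpre ⊢
  by_cases hb : s0.take 1 = ['b']
  · have hswb : PySem.Chars.startswith s0 ['b'] = true := by rw [pv_sw]; simp [hb]
    rw [if_pos (Or.inl hb)] at hpre
    simp only [hswb, if_true, hsl1, ha, PySem.Dict.get?, List.find?, hb]
    exact core (s0.drop 1) (-1) hpre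
  · have hswb : PySem.Chars.startswith s0 ['b'] = false := by
      rw [pv_sw]
      exact beq_eq_false_iff_ne.mpr (fun h => hb h.symm)
    by_cases hsh : s0.take 1 = ['#']
    · have hsws : PySem.Chars.startswith s0 ['#'] = true := by rw [pv_sw]; simp [hsh]
      rw [if_pos (Or.inr hsh)] at hpre
      simp only [hswb, hsws, Bool.false_eq_true, if_false, if_true, hsl1, ha,
        PySem.Dict.get?, List.find?, hsh]
      simpa using core (s0.drop 1) 1 hpre
    · have hsws : PySem.Chars.startswith s0 ['#'] = false := by
        rw [pv_sw]
        exact beq_eq_false_iff_ne.mpr (fun h => hsh h.symm)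
      rw [if_neg (by tauto)] at hpre
      simp only [hswb, hsws, Bool.false_eq_true, if_false, ha,
        PySem.Dict.get?, List.find?, beq_eq_false_iff_ne.mpr (Ne.symm hb),
        beq_eq_false_iff_ne.mpr (Ne.symm hsh)]
      simpa using core s0 0 hpre
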